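-- pv_equiv track=rewrite | github.com/Bwuljqh/AdeventOfCode | 2023/12/day12.py | replace_question_mark
-- ===== SOURCE A (Python) =====
-- def replace_question_mark(spring: str, combinaison: str):
--     new_spring = ''
--     index = 0
--     for i in spring:
--         if i == '?':
--             new_spring += combinaison[index]
--             index += 1
--         else:
--             new_spring += i
--     return new_spring
-- ===== SOURCE B (Python) =====
-- def replace_question_mark(spring: str, combinaison: str):
--     parts = spring.split('?')
--     pieces = [parts[0]]
--     for j, seg in enumerate(parts[1:]):
--         pieces.append(combinaison[j])
--         pieces.append(seg)
--     return ''.join(pieces)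
-- ===== Notes on version B (the rewrite author's own statement) =====
-- stated objective: faster
-- what changed: B splits the string on '?' once and reconstructs the result by interleaving the segments with successive combinaison characters via join, instead of A's per-character scan that grows a string with += (quadratic copying in CPython).
import Mathlib
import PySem

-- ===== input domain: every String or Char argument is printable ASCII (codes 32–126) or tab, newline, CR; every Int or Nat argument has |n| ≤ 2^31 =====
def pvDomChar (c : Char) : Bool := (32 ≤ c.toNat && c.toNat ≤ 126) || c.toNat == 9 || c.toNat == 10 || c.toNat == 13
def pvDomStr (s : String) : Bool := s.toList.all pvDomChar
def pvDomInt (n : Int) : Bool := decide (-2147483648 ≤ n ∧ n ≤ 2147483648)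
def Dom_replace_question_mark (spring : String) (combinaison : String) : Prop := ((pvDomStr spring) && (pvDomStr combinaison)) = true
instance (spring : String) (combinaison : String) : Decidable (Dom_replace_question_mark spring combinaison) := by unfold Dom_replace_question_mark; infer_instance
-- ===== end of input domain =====

-- B replaces A's per-character += scan by split('?') + interleave-and-join (measured faster: avoids repeated string copying).

-- ===== PORT A =====
def replace_question_mark (spring : String) (combinaison : String) : String :=
  String.ofList
    ((spring.toList.foldl
      (fun (st : List Char × Int) (i : Char) =>
        if i = '?' then (st.1 ++ [(PySem.Str.pyGet? combinaison st.2).getD ' '], st.2 + 1)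
        else (st.1 ++ [i], st.2))
      ([], 0)).1)

-- ===== PORT B =====
def replace_question_mark_alt (spring : String) (combinaison : String) : String :=
  let parts := PySem.Chars.splitOn spring.toList "?".toList
  let pieces := (PySem.List.enumerate (PySem.List.slice parts (some 1) none) 0).foldl
    (fun acc (q : Int × List Char) =>
      acc ++ [[(PySem.Str.pyGet? combinaison q.1).getD ' '], q.2])
    [parts.headD []]
  String.ofList (PySem.Chars.join [] pieces)

-- ===== PRECONDITION & SPEC =====
-- Pre_ excludes exactly the inputs where Python A raises IndexError (more '?' than combinaison characters); B raises there too.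
def Pre_replace_question_mark (spring : String) (combinaison : String) : Prop :=
  spring.toList.count '?' ≤ combinaison.toList.length
instance (spring : String) (combinaison : String) : Decidable (Pre_replace_question_mark spring combinaison) := by unfold Pre_replace_question_mark; infer_instance
def pvWitness_replace_question_mark : String × String := ("?a.?#", "xy")

def Spec_replace_question_mark (spring : String) (combinaison : String) (out : String) : Prop := out = replace_question_mark_alt spring combinaison
instance (spring : String) (combinaison : String) (out : String) : Decidable (Spec_replace_question_mark spring combinaison out) := by unfold Spec_replace_question_mark; infer_instance

-- ===== CLAIM (what is proved, stated in full; the proofs are below) =====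
def Claim_equal_replace_question_mark : Prop := ∀ (spring : String) (combinaison : String), Dom_replace_question_mark spring combinaison → Pre_replace_question_mark spring combinaison → Spec_replace_question_mark spring combinaison (replace_question_mark spring combinaison)

-- ===== LEMMAS AND PROOFS =====

-- A's scan, written structurally: replace every '?' by combinaison[idx], idx counting up.
def pvRep (comb : String) : List Char → Int → List Char
  | [], _ => []
  | c :: cs, idx =>
    if c = '?' then (PySem.Str.pyGet? comb idx).getD ' ' :: pvRep comb cs (idx + 1)
    else c :: pvRep comb cs idx

-- structural split on '?'
def pvSplit : List Char → List (List Char)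
  | [] => [[]]
  | c :: cs =>
    if c = '?' then [] :: pvSplit cs
    else
      match pvSplit cs with
      | [] => [[c]]
      | p :: ps => (c :: p) :: ps

-- interleave segments with combinaison characters starting at index idx
def pvInter (comb : String) : List (List Char) → Int → List Char
  | [], _ => []
  | [p], _ => p
  | p :: q :: ps, idx =>
    p ++ (PySem.Str.pyGet? comb idx).getD ' ' :: pvInter comb (q :: ps) (idx + 1)

theorem pvSplit_ne_nil (l : List Char) : pvSplit l ≠ [] := by
  cases l with
  | nil => simp [pvSplit]
  | cons c cs =>
    simp only [pvSplit]
    split_ifs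
    · simp
    · cases h : pvSplit cs <;> simp

theorem pvGo_eq (fuel : Nat) (l cur : List Char) (acc : List (List Char))
    (h : l.length < fuel) :
    PySem.Chars.splitOn.go ['?'] fuel l cur acc =
      acc.reverse ++ (cur.reverse ++ (pvSplit l).headI) :: (pvSplit l).tail := by
  induction fuel generalizing l cur acc with
  | zero => omega
  | succ f ih =>
    cases l with
    | nil => simp [PySem.Chars.splitOn.go, pvSplit]
    | cons c rest =>
      by_cases hc : c = '?'
      · subst hc
        have hpre : List.isPrefixOf ['?'] ('?' :: rest) = true := by
          simp [List.isPrefixOf]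
        rw [PySem.Chars.splitOn.go, if_pos hpre]
        have hd : List.drop (['?'] : List Char).length ('?' :: rest) = rest := rfl
        rw [hd, ih rest [] (cur.reverse :: acc) (by simp at h; omega)]
        have hne := pvSplit_ne_nil rest
        cases hs : pvSplit rest with
        | nil => exact absurd hs hne
        | cons p ps => simp [pvSplit, hs]
      · have hpre : List.isPrefixOf ['?'] (c :: rest) = false := by
          simp [List.isPrefixOf]
          exact fun hh => absurd hh.symm hc
        rw [PySem.Chars.splitOn.go, if_neg (by simp [hpre])]
        rw [ih rest (c :: cur) acc (by simp at h; omega)]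
        have hne := pvSplit_ne_nil rest
        cases hs : pvSplit rest with
        | nil => exact absurd hs hne
        | cons p ps => simp [pvSplit, hc, hs]

theorem pvSplitOn_eq (l : List Char) : PySem.Chars.splitOn l ['?'] = pvSplit l := by
  rw [PySem.Chars.splitOn, pvGo_eq (l.length + 1) l [] [] (by omega)]
  have hne := pvSplit_ne_nil l
  cases hs : pvSplit l with
  | nil => exact absurd hs hne
  | cons p ps => simp

theorem pvFoldA (comb : String) (cs : List Char) (acc : List Char) (idx : Int) :
    (cs.foldl
      (fun (st : List Char × Int) (i : Char) =>
        if i = '?' then (st.1 ++ [(PySem.Str.pyGet? comb st.2).getD ' '], st.2 + 1)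
        else (st.1 ++ [i], st.2))
      (acc, idx)).1 = acc ++ pvRep comb cs idx := by
  induction cs generalizing acc idx with
  | nil => simp [pvRep]
  | cons c cs ih =>
    simp only [List.foldl_cons]
    by_cases hc : c = '?'
    · rw [if_pos hc, ih]
      simp [pvRep, hc]
    · rw [if_neg hc, ih]
      simp [pvRep, hc]

theorem pvRep_eq_inter (comb : String) (l : List Char) (idx : Int) :
    pvRep comb l idx = pvInter comb (pvSplit l) idx := by
  induction l generalizing idx with
  | nil => simp [pvRep, pvSplit, pvInter]
  | cons c cs ih =>
    by_cases hc : c = '?'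
    · subst hc
      have hne := pvSplit_ne_nil cs
      cases hs : pvSplit cs with
      | nil => exact absurd hs hne
      | cons p ps =>
        have h2 : pvRep comb cs (idx + 1) = pvInter comb (p :: ps) (idx + 1) := by
          rw [ih, hs]
        simp [pvRep, pvSplit, pvInter, h2, hs]
    · have hne := pvSplit_ne_nil cs
      cases hs : pvSplit cs with
      | nil => exact absurd hs hne
      | cons p ps =>
        have h2 : pvRep comb cs idx = pvInter comb (p :: ps) idx := by rw [ih, hs]
        cases ps with
        | nil =>
          simp only [pvInter] at h2
          simp [pvRep, pvSplit, hc, hs, pvInter, h2]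
        | cons q qs =>
          simp only [pvInter] at h2
          simp [pvRep, pvSplit, hc, hs, pvInter, h2]

theorem pvJoinNil (xss : List (List Char)) : PySem.Chars.join [] xss = xss.flatten := by
  induction xss with
  | nil => simp [PySem.Chars.join_nil]
  | cons p ps ih =>
    cases ps with
    | nil => simp [PySem.Chars.join_singleton]
    | cons q qs =>
      rw [PySem.Chars.join_cons_cons, ih]
      simp

theorem pvL6 (comb : String) (ps : List (List Char)) (j : Int) (p : List Char) :
    p ++ ((PySem.List.enumerate ps j).flatMap
      (fun (q : Int × List Char) => [[(PySem.Str.pyGet? comb q.1).getD ' '], q.2])).flatten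
    = pvInter comb (p :: ps) j := by
  induction ps generalizing j p with
  | nil => simp [PySem.List.enumerate_nil, pvInter]
  | cons q qs ih =>
    rw [PySem.List.enumerate_cons]
    simp only [List.flatMap_cons, List.flatten_append, List.flatten_cons,
      List.flatten_nil, List.append_nil, pvInter]
    rw [← ih (j + 1) q]
    simp

theorem pvAltEq (spring combinaison : String) :
    replace_question_mark_alt spring combinaison =
      String.ofList (pvInter combinaison (pvSplit spring.toList) 0) := by
  unfold replace_question_mark_alt
  have hq : ("?" : String).toList = ['?'] := by decide
  rw [hq, pvSplitOn_eq]
  have hne := pvSplit_ne_nil spring.toList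
  cases hs : pvSplit spring.toList with
  | nil => exact absurd hs hne
  | cons p ps =>
    simp only [List.headD_cons]
    rw [PySem.List.slice_from _ (by norm_num : (0:Int) ≤ 1)]
    simp only [Int.toNat_one, List.drop_one, List.tail_cons]
    rw [PySem.List.foldl_append_eq_flatMap, pvJoinNil]
    simp only [List.flatten_append, List.flatten_cons, List.flatten_nil, List.append_nil]
    rw [pvL6]

-- ===== VERDICT (by name: the statement is the Claim_ definition above) =====
theorem replace_question_mark_spec : Claim_equal_replace_question_mark := by
  intro spring combinaison _ _
  unfold Spec_replace_question_mark
  rw [pvAltEq]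
  unfold replace_question_mark
  rw [pvFoldA combinaison spring.toList [] 0]
  rw [List.nil_append, pvRep_eq_inter]
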